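-- pv_equiv track=rewrite | github.com/yasmimlps/lipPython | LAB 16/questão_04.py | pares_acima_diagonal_principal
-- ===== SOURCE A (Python) =====
-- def pares_acima_diagonal_principal(matriz, ordem):
--     contador_pares = 0
--     for i in range(ordem):
--         for j in range(ordem):
--             if i < j:
--                 if matriz[i,j]%2 == 0:
--                     contador_pares +=1
--     return contador_pares
-- ===== SOURCE B (Python) =====
-- def pares_acima_diagonal_principal(matriz, ordem):
--     return sum(1 for (i, j), v in matriz.items() if 0 <= i < j < ordem and v % 2 == 0)
-- ===== Notes on version B (the rewrite author's own statement) =====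
-- stated objective: alternative
-- what changed: B replaces A's nested scan over all ordem^2 index pairs with dict lookups by a single pass over the dict's items, counting entries whose key (i,j) satisfies 0 <= i < j < ordem and whose value is even.
import Mathlib
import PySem

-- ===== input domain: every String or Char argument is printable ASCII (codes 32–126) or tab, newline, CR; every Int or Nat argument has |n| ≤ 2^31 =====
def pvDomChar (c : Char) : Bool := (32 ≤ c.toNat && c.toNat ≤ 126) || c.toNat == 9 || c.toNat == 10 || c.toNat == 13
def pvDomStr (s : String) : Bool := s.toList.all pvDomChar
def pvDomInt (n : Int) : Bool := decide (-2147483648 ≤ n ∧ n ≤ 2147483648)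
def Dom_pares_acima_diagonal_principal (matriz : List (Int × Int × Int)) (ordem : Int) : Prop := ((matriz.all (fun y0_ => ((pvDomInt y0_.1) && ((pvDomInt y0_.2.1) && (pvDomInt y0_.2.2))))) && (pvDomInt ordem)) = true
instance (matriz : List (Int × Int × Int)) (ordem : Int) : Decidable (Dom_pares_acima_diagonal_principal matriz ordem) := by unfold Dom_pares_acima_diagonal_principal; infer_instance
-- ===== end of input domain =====

-- B replaces A's nested index scan (ordem² dict lookups) by a single pass over the
-- dict's items, counting entries whose key (i, j) satisfies 0 ≤ i < j < ordem and
-- whose value is even.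

-- ===== PORT A =====
-- dict lookup matriz[(i,j)]: first match in the association list; none = KeyError
def pvLookup (m : List (Int × Int × Int)) (i j : Int) : Option Int :=
  (m.find? (fun t => t.1 == i && t.2.1 == j)).map (·.2.2)

def pares_acima_diagonal_principal (matriz : List (Int × Int × Int)) (ordem : Int) : Int :=
  (PySem.List.pyRange 0 ordem 1).foldl (fun acc i =>
    (PySem.List.pyRange 0 ordem 1).foldl (fun acc j =>
      if i < j then
        match pvLookup matriz i j with
        | some v => if PySem.Int.mod v 2 == 0 then acc + 1 else acc
        | none => acc   -- Python raises KeyError here; excluded by Pre_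
      else acc) acc) 0

-- ===== PORT B =====
def pares_acima_diagonal_principal_alt (matriz : List (Int × Int × Int)) (ordem : Int) : Int :=
  (matriz.countP (fun t =>
    decide (0 ≤ t.1) && decide (t.1 < t.2.1) && decide (t.2.1 < ordem)
      && (PySem.Int.mod t.2.2 2 == 0)) : Int)

-- ===== PRECONDITION & SPEC =====
-- Pre_ excludes (a) association lists with duplicate (i,j) keys, which represent no
-- Python dict (A still returns a value on them, but first-match lookup vs item
-- iteration legitimately disagree), and (b) dicts missing some upper-triangle key
-- with 0 <= i < j < ordem, on which A raises KeyError; with distinct keys, all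
-- ordem*(ordem-1)/2 such keys are present iff exactly that many entries carry one.
def Pre_pares_acima_diagonal_principal (matriz : List (Int × Int × Int)) (ordem : Int) : Prop :=
  (matriz.map (fun t => (t.1, t.2.1))).Nodup ∧
  (1 < ordem →
    ((matriz.countP (fun t => decide (0 ≤ t.1 ∧ t.1 < t.2.1 ∧ t.2.1 < ordem)) : Int)
      = ordem * (ordem - 1) / 2))
instance (matriz : List (Int × Int × Int)) (ordem : Int) : Decidable (Pre_pares_acima_diagonal_principal matriz ordem) := by unfold Pre_pares_acima_diagonal_principal; infer_instance

def pvWitness_pares_acima_diagonal_principal : (List (Int × Int × Int)) × Int := ([(0, 1, 2)], 2)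

def Spec_pares_acima_diagonal_principal (matriz : List (Int × Int × Int)) (ordem : Int) (out : Int) : Prop := out = pares_acima_diagonal_principal_alt matriz ordem
instance (matriz : List (Int × Int × Int)) (ordem : Int) (out : Int) : Decidable (Spec_pares_acima_diagonal_principal matriz ordem out) := by unfold Spec_pares_acima_diagonal_principal; infer_instance

-- ===== CLAIM (what is proved, stated in full; the proofs are below) =====
def Claim_equal_pares_acima_diagonal_principal : Prop := ∀ (matriz : List (Int × Int × Int)) (ordem : Int), Dom_pares_acima_diagonal_principal matriz ordem → Pre_pares_acima_diagonal_principal matriz ordem → Spec_pares_acima_diagonal_principal matriz ordem (pares_acima_diagonal_principal matriz ordem)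

-- ===== LEMMAS AND PROOFS =====

-- the total form of A's lookup test, used only in the proofs
def pvEvenLook (m : List (Int × Int × Int)) (i j : Int) : Bool :=
  match pvLookup m i j with
  | some v => PySem.Int.mod v 2 == 0
  | none => false

-- B's per-entry predicate
def pvQ (ordem : Int) (t : Int × Int × Int) : Bool :=
  decide (0 ≤ t.1) && decide (t.1 < t.2.1) && decide (t.2.1 < ordem)
    && (PySem.Int.mod t.2.2 2 == 0)

lemma pvLookup_mem {m : List (Int × Int × Int)} {i j v : Int}
    (h : pvLookup m i j = some v) : (i, j, v) ∈ m := by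
  unfold pvLookup at h
  rcases ho : m.find? (fun t => t.1 == i && t.2.1 == j) with _ | t
  · rw [ho] at h; simp at h  -- find? none: contradiction
  · rw [ho] at h
    simp only [Option.map_some, Option.some.injEq] at h
    have hm := List.mem_of_find?_eq_some ho
    have hp := List.find?_some ho
    simp only [Bool.and_eq_true, beq_iff_eq] at hp
    obtain ⟨t1, t2, t3⟩ := t
    simp only at hp h
    obtain ⟨h1, h2⟩ := hp
    subst h1 h2 h
    exact hm

lemma pvMem_lookup {m : List (Int × Int × Int)} {t : Int × Int × Int}
    (hnd : (m.map (fun t => (t.1, t.2.1))).Nodup) (ht : t ∈ m) :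
    pvLookup m t.1 t.2.1 = some t.2.2 := by
  induction m with
  | nil => cases ht
  | cons a m ih =>
    simp only [List.map_cons, List.nodup_cons] at hnd
    rcases List.mem_cons.1 ht with h | h
    · subst h
      simp [pvLookup]
    · by_cases hk : a.1 = t.1 ∧ a.2.1 = t.2.1
      · exfalso
        exact hnd.1 (by
          refine List.mem_map.2 ⟨t, h, ?_⟩
          simp [hk.1, hk.2])
      · have := ih hnd.2 h
        unfold pvLookup at this ⊢
        rw [List.find?_cons_of_neg]
        · exact this
        · simp only [Bool.and_eq_true, beq_iff_eq, not_and]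
          intro h1 h2; exact hk ⟨h1, h2⟩

lemma pv_countP_flatMap {α β : Type} (l : List α) (f : α → List β) (p : β → Bool) :
    ((l.flatMap f).countP p) = (l.map (fun a => ((f a).countP p))).sum := by
  induction l with
  | nil => simp
  | cons a l ih => simp [List.flatMap_cons, List.countP_append, ih]

lemma pv_sum_map_natCast {α : Type} (l : List α) (c : α → ℕ) :
    (l.map (fun a => ((c a : ℕ) : Int))).sum = (((l.map c).sum : ℕ) : Int) := by
  induction l with
  | nil => simp
  | cons a l ih => simp [ih]

-- A's nested loop is a count over the full index square
lemma pvA_eq_count (m : List (Int × Int × Int)) (ordem : Int) :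
    pares_acima_diagonal_principal m ordem =
      ((((PySem.List.pyRange 0 ordem 1).flatMap
          (fun i => (PySem.List.pyRange 0 ordem 1).map (fun j => (i, j)))).countP
        (fun p => decide (p.1 < p.2) && pvEvenLook m p.1 p.2) : ℕ) : Int) := by
  unfold pares_acima_diagonal_principal
  rw [PySem.List.foldl_congr_mem
    (g := fun acc i => acc +
      (((PySem.List.pyRange 0 ordem 1).countP
        (fun j => decide (i < j) && pvEvenLook m i j) : ℕ) : Int))]
  · rw [PySem.List.foldl_add]
    rw [pv_countP_flatMap]
    simp only [List.countP_map]
    rw [pv_sum_map_natCast]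
    simp [Function.comp_def]
  · intro acc i _
    rw [PySem.List.foldl_congr_mem
      (g := fun acc j => if decide (i < j) && pvEvenLook m i j then acc + 1 else acc)]
    · rw [PySem.List.foldl_if_add_one]
    · intro acc' j _
      by_cases hij : i < j
      · simp only [hij, if_true, decide_true, Bool.true_and]
        unfold pvEvenLook
        rcases pvLookup m i j with _ | v <;> simp
      · simp [hij]

-- ===== VERDICT (by name: the statement is the Claim_ definition above) =====
theorem pares_acima_diagonal_principal_spec : Claim_equal_pares_acima_diagonal_principal := by
  intro m ordem _ hpre
  unfold Spec_pares_acima_diagonal_principal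
  rw [pvA_eq_count]
  unfold pares_acima_diagonal_principal_alt
  have hperm :
      (((PySem.List.pyRange 0 ordem 1).flatMap
          (fun i => (PySem.List.pyRange 0 ordem 1).map (fun j => (i, j)))).filter
        (fun p => decide (p.1 < p.2) && pvEvenLook m p.1 p.2)).Perm
      ((m.filter (pvQ ordem)).map (fun t => (t.1, t.2.1))) := by
    apply (List.perm_ext_iff_of_nodup ?_ ?_).2
    · intro p
      constructor
      · intro hp
        rw [List.mem_filter] at hp
        obtain ⟨hmem, hcond⟩ := hp
        simp only [List.mem_flatMap, List.mem_map, PySem.List.mem_pyRange_one] at hmem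
        obtain ⟨i, hi, j, hj, hpe⟩ := hmem
        subst hpe
        simp only [Bool.and_eq_true, decide_eq_true_eq] at hcond
        obtain ⟨hij, hel⟩ := hcond
        unfold pvEvenLook at hel
        rcases hv : pvLookup m i j with _ | v
        · rw [hv] at hel; simp at hel
        · rw [hv] at hel
          have hel' : (PySem.Int.mod v 2 == 0) = true := hel
          have htm := pvLookup_mem hv
          refine List.mem_map.2 ⟨(i, j, v), List.mem_filter.2 ⟨htm, ?_⟩, rfl⟩
          unfold pvQ
          simp only [PySem.Int.mod] at hel'
          simp [hi.1, hij, hj.2, PySem.Int.mod, hel']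
      · intro hp
        obtain ⟨t, htf, hpe⟩ := List.mem_map.1 hp
        rw [List.mem_filter] at htf
        obtain ⟨htm, hq⟩ := htf
        unfold pvQ at hq
        simp only [Bool.and_eq_true, decide_eq_true_eq] at hq
        obtain ⟨⟨⟨h0, h1⟩, h2⟩, h3⟩ := hq
        subst hpe
        rw [List.mem_filter]
        constructor
        · simp only [List.mem_flatMap, List.mem_map, PySem.List.mem_pyRange_one]
          exact ⟨t.1, ⟨h0, lt_trans h1 h2⟩, t.2.1, ⟨by omega, h2⟩, rfl⟩
        · simp only [Bool.and_eq_true, decide_eq_true_eq]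
          refine ⟨h1, ?_⟩
          unfold pvEvenLook
          rw [pvMem_lookup hpre.1 htm]
          simpa [PySem.Int.mod] using h3
    · apply List.Nodup.filter
      have : ((PySem.List.pyRange 0 ordem 1).flatMap
          (fun i => (PySem.List.pyRange 0 ordem 1).map (fun j => (i, j)))) =
          (PySem.List.pyRange 0 ordem 1).product (PySem.List.pyRange 0 ordem 1) := rfl
      rw [this]
      exact List.Nodup.product (PySem.List.nodup_pyRange_one _ _)
        (PySem.List.nodup_pyRange_one _ _)
    · exact hpre.1.sublist
        (List.Sublist.map (f := fun t : Int × Int × Int => (t.1, t.2.1))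
          (List.filter_sublist (p := pvQ ordem) (l := m)))
  have hlen := hperm.length_eq
  rw [List.length_map] at hlen
  unfold pvQ at hlen
  simp only [List.countP_eq_length_filter]
  exact_mod_cast hlen
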